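-- pv_equiv track=rewrite | github.com/SkimFelBon/sudoku | helpers.py | nicelyQuadrant
-- ===== SOURCE A (Python) =====
-- quadrant = [[0, 1, 2, 9, 10, 11, 18, 19, 20],
--             [3, 4, 5, 12, 13, 14, 21, 22, 23],
--             [6, 7, 8, 15, 16, 17, 24, 25, 26],
--             [27, 28, 29, 36, 37, 38, 45, 46, 47],
--             [30, 31, 32, 39, 40, 41, 48, 49, 50],
--             [33, 34, 35, 42, 43, 44, 51, 52, 53],
--             [54, 55, 56, 63, 64, 65, 72, 73, 74],
--             [57, 58, 59, 66, 67, 68, 75, 76, 77],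
--             [60, 61, 62, 69, 70, 71, 78, 79, 80]]
--
-- def findQuadrant(i,j, quadrant):
--     """ This function finds(detects) to which quadrant our zero belongs """
--     for h in range(len(quadrant)):
--         for k in range(len(quadrant[h])):
--             index_h = quadrant[h][k] // 9
--             index_k = quadrant[h][k] % 9
--             if (i, j) == (index_h, index_k):
--                 return quadrant[h]
--
-- def nicelyQuadrant(pyzzle, n, i, j):
--     """ This function check's if we can use n in this quadrant """
--     box = findQuadrant(i, j, quadrant)
--     for v in box:
--         index_i = v // 9
--         index_j = v % 9
--         if pyzzle[index_i][index_j] == n: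
--             return False
--     return True
-- ===== SOURCE B (Python) =====
-- def nicelyQuadrant(pyzzle, n, i, j):
--     """ This function check's if we can use n in this quadrant """
--     r0 = (i // 3) * 3
--     c0 = (j // 3) * 3
--     for r in range(r0, r0 + 3):
--         for c in range(c0, c0 + 3):
--             if pyzzle[r][c] == n:
--                 return False
--     return True
-- ===== Notes on version B (the rewrite author's own statement) =====
-- stated objective: simpler
-- what changed: Drops the 81-entry quadrant index table and the findQuadrant table scan; B computes the box's top-left corner by arithmetic ((i//3)*3, (j//3)*3) and checks the same nine cells directly.
-- outside the precondition, e.g. on nicelyQuadrant([[5]], 5, 0, 0): A returns False, B returns False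
import Mathlib
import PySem

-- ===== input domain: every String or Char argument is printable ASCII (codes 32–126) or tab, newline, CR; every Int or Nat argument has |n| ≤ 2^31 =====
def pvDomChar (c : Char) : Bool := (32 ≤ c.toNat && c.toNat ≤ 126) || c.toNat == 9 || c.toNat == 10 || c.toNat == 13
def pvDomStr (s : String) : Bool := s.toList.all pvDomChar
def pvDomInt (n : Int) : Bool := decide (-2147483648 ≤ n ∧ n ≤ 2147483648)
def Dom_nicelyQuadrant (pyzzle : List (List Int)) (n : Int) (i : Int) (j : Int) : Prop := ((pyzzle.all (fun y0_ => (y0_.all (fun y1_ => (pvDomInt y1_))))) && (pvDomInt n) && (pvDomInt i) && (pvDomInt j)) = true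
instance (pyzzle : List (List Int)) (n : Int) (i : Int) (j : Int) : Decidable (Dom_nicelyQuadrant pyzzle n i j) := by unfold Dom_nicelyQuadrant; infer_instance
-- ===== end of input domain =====

-- B replaces A's precomputed 81-entry quadrant table and table-scanning findQuadrant by
-- direct arithmetic on the box corner ((i//3)*3, (j//3)*3), checking the same nine cells
-- in the same order (objective: simpler).


-- ===== PORT A =====
def quadrantTable : List (List Int) :=
  [[0, 1, 2, 9, 10, 11, 18, 19, 20],
   [3, 4, 5, 12, 13, 14, 21, 22, 23],
   [6, 7, 8, 15, 16, 17, 24, 25, 26],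
   [27, 28, 29, 36, 37, 38, 45, 46, 47],
   [30, 31, 32, 39, 40, 41, 48, 49, 50],
   [33, 34, 35, 42, 43, 44, 51, 52, 53],
   [54, 55, 56, 63, 64, 65, 72, 73, 74],
   [57, 58, 59, 66, 67, 68, 75, 76, 77],
   [60, 61, 62, 69, 70, 71, 78, 79, 80]]

-- inner loop of findQuadrant: does row quadrant[h] contain the flat index of (i, j)?
def fqRowHit (i j : Int) : List Int → Bool
  | [] => false
  | v :: rest =>
      if i = PySem.Int.floordiv v 9 ∧ j = PySem.Int.mod v 9 then true
      else fqRowHit i j rest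

-- outer loop of findQuadrant: first matching row; none = Python's implicit `return None`
def findQuadrant (i j : Int) : List (List Int) → Option (List Int)
  | [] => none
  | row :: rest => if fqRowHit i j row then some row else findQuadrant i j rest

-- loop of nicelyQuadrant over the found box; `false` at a failed lookup marks the
-- IndexError Python raises there (excluded by Pre_)
def nqLoopA (pyzzle : List (List Int)) (n : Int) : List Int → Bool
  | [] => true
  | v :: rest =>
      match PySem.List.pyGet? pyzzle (PySem.Int.floordiv v 9) with
      | none => false
      | some row =>
        match PySem.List.pyGet? row (PySem.Int.mod v 9) with
        | none => false
        | some x => if x = n then false else nqLoopA pyzzle n rest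

def nicelyQuadrant (pyzzle : List (List Int)) (n : Int) (i : Int) (j : Int) : Bool :=
  match findQuadrant i j quadrantTable with
  | none => false   -- Python raises TypeError iterating None (excluded by Pre_)
  | some box => nqLoopA pyzzle n box

-- ===== PORT B =====
-- inner loop over the three column indices of the box
def nqAltInner (row : List Int) (n : Int) : List Int → Bool
  | [] => true
  | c :: cs =>
      match PySem.List.pyGet? row c with
      | none => false   -- IndexError (excluded by Pre_)
      | some x => if x = n then false else nqAltInner row n cs

-- outer loop over the three row indices of the box
def nqAltOuter (pyzzle : List (List Int)) (n : Int) (c0 : Int) : List Int → Bool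
  | [] => true
  | r :: rs =>
      match PySem.List.pyGet? pyzzle r with
      | none => false   -- IndexError (excluded by Pre_)
      | some row =>
        if nqAltInner row n (PySem.List.pyRange c0 (c0 + 3) 1) then
          nqAltOuter pyzzle n c0 rs
        else false

def nicelyQuadrant_alt (pyzzle : List (List Int)) (n : Int) (i : Int) (j : Int) : Bool :=
  let r0 := PySem.Int.floordiv i 3 * 3
  let c0 := PySem.Int.floordiv j 3 * 3
  nqAltOuter pyzzle n c0 (PySem.List.pyRange r0 (r0 + 3) 1)

-- ===== PRECONDITION & SPEC =====
-- Pre_ = exactly where A returns normally, up to accidental early exits: cell (i, j) on the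
-- board and all nine cells of its 3x3 box present in the grid. Outside it A raises: TypeError
-- (findQuadrant returns None) when (i, j) is not in 0..8, and IndexError on a grid missing a
-- box cell -- except that on such grids A can still return False by matching n before reaching
-- the missing cell (see cites); those accidental early exits are excluded with the crashing grids.
def Pre_nicelyQuadrant (pyzzle : List (List Int)) (n : Int) (i : Int) (j : Int) : Prop :=
  0 ≤ i ∧ i < 9 ∧ 0 ≤ j ∧ j < 9 ∧
  ∀ r ∈ PySem.List.pyRange (PySem.Int.floordiv i 3 * 3) (PySem.Int.floordiv i 3 * 3 + 3) 1,
    ((PySem.List.pyGet? pyzzle r).elim false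
      (fun row => decide (PySem.Int.floordiv j 3 * 3 + 3 ≤ (row.length : Int)))) = true
instance (pyzzle : List (List Int)) (n : Int) (i : Int) (j : Int) : Decidable (Pre_nicelyQuadrant pyzzle n i j) := by unfold Pre_nicelyQuadrant; infer_instance

def pvWitness_nicelyQuadrant : List (List Int) × Int × Int × Int :=
  ([[5, 3, 0, 0, 7, 0, 0, 0, 0],
    [6, 0, 0, 1, 9, 5, 0, 0, 0],
    [0, 9, 8, 0, 0, 0, 0, 6, 0],
    [8, 0, 0, 0, 6, 0, 0, 0, 3],
    [4, 0, 0, 8, 0, 3, 0, 0, 1],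
    [7, 0, 0, 0, 2, 0, 0, 0, 6],
    [0, 6, 0, 0, 0, 0, 2, 8, 0],
    [0, 0, 0, 4, 1, 9, 0, 0, 5],
    [0, 0, 0, 0, 8, 0, 0, 7, 9]], 4, 4, 4)

def Spec_nicelyQuadrant (pyzzle : List (List Int)) (n : Int) (i : Int) (j : Int) (out : Bool) : Prop := out = nicelyQuadrant_alt pyzzle n i j
instance (pyzzle : List (List Int)) (n : Int) (i : Int) (j : Int) (out : Bool) : Decidable (Spec_nicelyQuadrant pyzzle n i j out) := by unfold Spec_nicelyQuadrant; infer_instance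

-- ===== CLAIM (what is proved, stated in full; the proofs are below) =====
def Claim_equal_nicelyQuadrant : Prop := ∀ (pyzzle : List (List Int)) (n : Int) (i : Int) (j : Int), Dom_nicelyQuadrant pyzzle n i j → Pre_nicelyQuadrant pyzzle n i j → Spec_nicelyQuadrant pyzzle n i j (nicelyQuadrant pyzzle n i j)

-- ===== LEMMAS AND PROOFS =====

-- the nine flat indices of the box with top-left corner (r0, c0), in A's (row-major) order
def boxList (r0 c0 : Int) : List Int :=
  [9 * r0 + c0, 9 * r0 + c0 + 1, 9 * r0 + c0 + 2,
   9 * (r0 + 1) + c0, 9 * (r0 + 1) + c0 + 1, 9 * (r0 + 1) + c0 + 2,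
   9 * (r0 + 2) + c0, 9 * (r0 + 2) + c0 + 1, 9 * (r0 + 2) + c0 + 2]

lemma floordiv_nine_mul_add (r c : Int) (h0 : 0 ≤ c) (h9 : c < 9) :
    PySem.Int.floordiv (9 * r + c) 9 = r ∧ PySem.Int.mod (9 * r + c) 9 = c := by
  constructor
  · rw [PySem.Int.floordiv_eq_iff_of_pos (by norm_num)]; omega
  · have h := PySem.Int.floordiv_mul_add_mod (9 * r + c) 9
    rw [(PySem.Int.floordiv_eq_iff_of_pos (by norm_num : (0:Int) < 9)).2 (by omega : r * 9 ≤ 9 * r + c ∧ 9 * r + c < (r + 1) * 9)] at h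
    omega

lemma pyRange3 (a : Int) : PySem.List.pyRange a (a + 3) 1 = [a, a + 1, a + 2] := by
  rw [PySem.List.pyRange_one_cons (by omega), PySem.List.pyRange_one_cons (by omega),
      PySem.List.pyRange_one_cons (by omega), PySem.List.pyRange_one_eq_nil (by omega)]
  norm_num
  omega

lemma nqLoopA_nil (pyzzle : List (List Int)) (n : Int) : nqLoopA pyzzle n [] = true := rfl

lemma nqAltOuter_nil (pyzzle : List (List Int)) (n c0 : Int) : nqAltOuter pyzzle n c0 [] = true := rfl

lemma nqLoopA_cons (pyzzle : List (List Int)) (n v : Int) (rest : List Int) :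
    nqLoopA pyzzle n (v :: rest)
      = match PySem.List.pyGet? pyzzle (PySem.Int.floordiv v 9) with
        | none => false
        | some row =>
          match PySem.List.pyGet? row (PySem.Int.mod v 9) with
          | none => false
          | some x => if x = n then false else nqLoopA pyzzle n rest := rfl

lemma nqAltInner_cons (row : List Int) (n c : Int) (cs : List Int) :
    nqAltInner row n (c :: cs)
      = match PySem.List.pyGet? row c with
        | none => false
        | some x => if x = n then false else nqAltInner row n cs := rfl

lemma nqAltOuter_cons (pyzzle : List (List Int)) (n c0 r : Int) (rs : List Int) :
    nqAltOuter pyzzle n c0 (r :: rs)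
      = match PySem.List.pyGet? pyzzle r with
        | none => false
        | some row =>
          if nqAltInner row n (PySem.List.pyRange c0 (c0 + 3) 1) then nqAltOuter pyzzle n c0 rs
          else false := rfl

-- A's scan of one box row [9r+c0, 9r+c0+1, 9r+c0+2] ++ rest equals B's fetch-row-then-inner step
lemma rowA_step (pyzzle : List (List Int)) (n r c0 : Int) (rest : List Int)
    (h0 : 0 ≤ c0) (h9 : c0 + 2 < 9) :
    nqLoopA pyzzle n ((9 * r + c0) :: (9 * r + c0 + 1) :: (9 * r + c0 + 2) :: rest)
      = match PySem.List.pyGet? pyzzle r with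
        | none => false
        | some row =>
          if nqAltInner row n (PySem.List.pyRange c0 (c0 + 3) 1) then nqLoopA pyzzle n rest
          else false := by
  obtain ⟨hd0, hm0⟩ := floordiv_nine_mul_add r c0 (by omega) (by omega)
  obtain ⟨hd1, hm1⟩ := floordiv_nine_mul_add r (c0 + 1) (by omega) (by omega)
  obtain ⟨hd2, hm2⟩ := floordiv_nine_mul_add r (c0 + 2) (by omega) (by omega)
  have e1 : 9 * r + c0 + 1 = 9 * r + (c0 + 1) := by ring
  have e2 : 9 * r + c0 + 2 = 9 * r + (c0 + 2) := by ring
  rw [e1, e2, nqLoopA_cons, nqLoopA_cons, nqLoopA_cons, hd0, hm0, hd1, hm1, hd2, hm2, pyRange3]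
  cases hrow : PySem.List.pyGet? pyzzle r with
  | none => rfl
  | some row =>
    simp only [nqAltInner_cons]
    cases hc0 : PySem.List.pyGet? row c0 with
    | none => rfl
    | some x0 =>
      by_cases hx0 : x0 = n
      · simp [hx0]
      · simp only [if_neg hx0]
        cases hc1 : PySem.List.pyGet? row (c0 + 1) with
        | none => simp
        | some x1 =>
          by_cases hx1 : x1 = n
          · simp [hx1]
          · simp only [if_neg hx1]
            cases hc2 : PySem.List.pyGet? row (c0 + 2) with
            | none => simp
            | some x2 =>
              by_cases hx2 : x2 = n
              · simp [hx2]
              · simp [if_neg hx2, nqAltInner]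

-- A's scan of the whole box equals B's two nested loops over the box corner
lemma box_eq (pyzzle : List (List Int)) (n r0 c0 : Int) (h0 : 0 ≤ c0) (h9 : c0 + 2 < 9) :
    nqLoopA pyzzle n (boxList r0 c0) = nqAltOuter pyzzle n c0 (PySem.List.pyRange r0 (r0 + 3) 1) := by
  rw [pyRange3]
  simp only [boxList]
  simp only [rowA_step pyzzle n r0 c0 _ h0 h9, rowA_step pyzzle n (r0 + 1) c0 _ h0 h9,
             rowA_step pyzzle n (r0 + 2) c0 _ h0 h9,
             nqAltOuter_cons, nqAltOuter_nil, nqLoopA_nil]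

-- on the board, findQuadrant returns exactly the box of the arithmetic corner
lemma findQuadrant_box (i j : Int) (hi0 : 0 ≤ i) (hi9 : i < 9) (hj0 : 0 ≤ j) (hj9 : j < 9) :
    findQuadrant i j quadrantTable
      = some (boxList (PySem.Int.floordiv i 3 * 3) (PySem.Int.floordiv j 3 * 3)) := by
  interval_cases i <;> interval_cases j <;> rfl

lemma corner_bounds (j : Int) (hj0 : 0 ≤ j) (hj9 : j < 9) :
    0 ≤ PySem.Int.floordiv j 3 * 3 ∧ PySem.Int.floordiv j 3 * 3 + 2 < 9 := by
  have h := PySem.Int.floordiv_mul_add_mod j 3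
  have h1 := PySem.Int.mod_nonneg j (b := 3) (by norm_num)
  have h2 := PySem.Int.mod_lt j (b := 3) (by norm_num)
  omega

-- ===== VERDICT (by name: the statement is the Claim_ definition above) =====
theorem nicelyQuadrant_spec : Claim_equal_nicelyQuadrant := by
  intro pyzzle n i j _ hpre
  obtain ⟨hi0, hi9, hj0, hj9, -⟩ := hpre
  unfold Spec_nicelyQuadrant nicelyQuadrant nicelyQuadrant_alt
  rw [findQuadrant_box i j hi0 hi9 hj0 hj9]
  obtain ⟨hc0, hc9⟩ := corner_bounds j hj0 hj9
  exact box_eq pyzzle n _ _ hc0 hc9
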